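-- pv_equiv track=rewrite | github.com/ProvableHQ/python-sdk | leotranspiler/leotranspiler/_leo_helper.py | _get_leo_integer_type
-- ===== SOURCE A (Python) =====
-- _leo_type_bits = [2**3, 2**4, 2**5, 2**6, 2**7]
--
-- def _get_leo_integer_type(signed: bool, value_bits: int):
--     for bits in _leo_type_bits:
--         # Subtract 1 bit for signed integers
--         max_bits = bits - 1 if signed else bits
--         if value_bits <= max_bits:
--             return f"{'i' if signed else 'u'}{bits}"
--
--     raise ValueError(
--         f"No leo type for {'signed' if signed else 'unsigned'} value with more than "
--         f"{_leo_type_bits[-1]} bits. Try quantizing the model and/or the data."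
--     )
-- ===== SOURCE B (Python) =====
-- def _get_leo_integer_type(signed: bool, value_bits: int):
--     # Closed-form: smallest power-of-two width >= total required bits, via bit_length.
--     required = value_bits + (1 if signed else 0)
--     bits = 8 if required <= 8 else 1 << (required - 1).bit_length()
--     if bits > 128:
--         raise ValueError(
--             f"No leo type for {'signed' if signed else 'unsigned'} value with more than "
--             f"128 bits. Try quantizing the model and/or the data."
--         )
--     return f"{'i' if signed else 'u'}{bits}"
-- ===== Notes on version B (the rewrite author's own statement) =====
-- stated objective: simpler
-- what changed: B replaces A's linear scan over the candidate type widths by a closed-form computation: required bits = value_bits + (1 if signed), width = 8 or the next power of two via bit_length.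
import Mathlib
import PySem

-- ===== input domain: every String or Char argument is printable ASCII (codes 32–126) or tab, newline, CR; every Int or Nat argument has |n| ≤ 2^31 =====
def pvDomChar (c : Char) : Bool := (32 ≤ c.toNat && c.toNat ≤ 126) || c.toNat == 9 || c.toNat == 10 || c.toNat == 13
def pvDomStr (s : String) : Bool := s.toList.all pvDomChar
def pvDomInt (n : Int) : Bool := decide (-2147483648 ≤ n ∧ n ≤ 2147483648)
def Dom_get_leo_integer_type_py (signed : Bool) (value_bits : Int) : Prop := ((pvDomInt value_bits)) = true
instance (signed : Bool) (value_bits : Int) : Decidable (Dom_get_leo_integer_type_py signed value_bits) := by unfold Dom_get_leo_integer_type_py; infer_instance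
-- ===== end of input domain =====

-- B replaces A's scan over the candidate widths by a closed-form bit-length computation (objective: simpler).

-- ===== PORT A =====
-- loop 'for bits in _leo_type_bits' with early return; none = the ValueError path
def leoLoopA (signed : Bool) (value_bits : Int) : List Int → Option String
  | [] => none
  | bits :: rest =>
    let max_bits := if signed then bits - 1 else bits
    if value_bits ≤ max_bits then
      some ((if signed then "i" else "u") ++ PySem.Int.toStr bits)
    else leoLoopA signed value_bits rest

def get_leo_integer_type_py (signed : Bool) (value_bits : Int) : String :=
  (leoLoopA signed value_bits [8, 16, 32, 64, 128]).getD ""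

-- ===== PORT B =====
-- required = value_bits + (1 if signed else 0); bits = 8 or 1 << (required-1).bit_length();
-- the raise path (bits > 128) yields "" (excluded by Pre_).
def get_leo_integer_type_py_alt (signed : Bool) (value_bits : Int) : String :=
  let required : Int := value_bits + (if signed then 1 else 0)
  let bits : Int := if required ≤ 8 then 8 else (2 : Int) ^ (Nat.log2 (required - 1).toNat + 1)
  if bits > 128 then ""
  else (if signed then "i" else "u") ++ PySem.Int.toStr bits

-- ===== PRECONDITION & SPEC =====
-- Pre_ excludes exactly the inputs on which A raises ValueError (value_bits beyond the 128-bit type).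
def Pre_get_leo_integer_type_py (signed : Bool) (value_bits : Int) : Prop :=
  value_bits ≤ if signed then 127 else 128
instance (signed : Bool) (value_bits : Int) : Decidable (Pre_get_leo_integer_type_py signed value_bits) := by unfold Pre_get_leo_integer_type_py; infer_instance

def pvWitness_get_leo_integer_type_py : Bool × Int := (false, 16)

def Spec_get_leo_integer_type_py (signed : Bool) (value_bits : Int) (out : String) : Prop := out = get_leo_integer_type_py_alt signed value_bits
instance (signed : Bool) (value_bits : Int) (out : String) : Decidable (Spec_get_leo_integer_type_py signed value_bits out) := by unfold Spec_get_leo_integer_type_py; infer_instance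

-- ===== CLAIM (what is proved, stated in full; the proofs are below) =====
def Claim_equal_get_leo_integer_type_py : Prop := ∀ (signed : Bool) (value_bits : Int), Dom_get_leo_integer_type_py signed value_bits → Pre_get_leo_integer_type_py signed value_bits → Spec_get_leo_integer_type_py signed value_bits (get_leo_integer_type_py signed value_bits)

-- ===== LEMMAS AND PROOFS =====

theorem pv_log2_between (k n : ℕ) (h1 : 2 ^ k ≤ n) (h2 : n < 2 ^ (k + 1)) : Nat.log2 n = k := by
  rw [Nat.log2_eq_log_two]
  exact Nat.log_eq_of_pow_le_of_lt_pow h1 h2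

-- ===== VERDICT (by name: the statement is the Claim_ definition above) =====
theorem get_leo_integer_type_py_spec : Claim_equal_get_leo_integer_type_py := by
  intro signed value_bits _hdom hpre
  unfold Spec_get_leo_integer_type_py get_leo_integer_type_py get_leo_integer_type_py_alt
  cases signed <;>
    simp only [Pre_get_leo_integer_type_py, if_true, if_false, Bool.false_eq_true] at hpre ⊢
  · -- unsigned: required = value_bits
    by_cases h8 : value_bits ≤ 8
    · simp [leoLoopA, h8]
    · by_cases h16 : value_bits ≤ 16
      · have hl : Nat.log2 (value_bits.toNat - 1) = 3 := pv_log2_between 3 _ (by omega) (by omega)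
        simp [leoLoopA, hl, h8, h16]
      · by_cases h32 : value_bits ≤ 32
        · have hl : Nat.log2 (value_bits.toNat - 1) = 4 := pv_log2_between 4 _ (by omega) (by omega)
          simp [leoLoopA, hl, h8, h16, h32]
        · by_cases h64 : value_bits ≤ 64
          · have hl : Nat.log2 (value_bits.toNat - 1) = 5 := pv_log2_between 5 _ (by omega) (by omega)
            simp [leoLoopA, hl, h8, h16, h32, h64]
          · have hl : Nat.log2 (value_bits.toNat - 1) = 6 := pv_log2_between 6 _ (by omega) (by omega)
            simp [leoLoopA, hl, h8, h16, h32, h64, hpre]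
  · -- signed: required = value_bits + 1
    by_cases h8 : value_bits ≤ 7
    · simp [leoLoopA, h8, show value_bits + 1 ≤ 8 by omega]
    · by_cases h16 : value_bits ≤ 15
      · have hl : Nat.log2 value_bits.toNat = 3 := pv_log2_between 3 _ (by omega) (by omega)
        simp [leoLoopA, hl, h8, h16, show ¬ value_bits + 1 ≤ 8 by omega]
      · by_cases h32 : value_bits ≤ 31
        · have hl : Nat.log2 value_bits.toNat = 4 := pv_log2_between 4 _ (by omega) (by omega)
          simp [leoLoopA, hl, h8, h16, h32, show ¬ value_bits + 1 ≤ 8 by omega]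
        · by_cases h64 : value_bits ≤ 63
          · have hl : Nat.log2 value_bits.toNat = 5 := pv_log2_between 5 _ (by omega) (by omega)
            simp [leoLoopA, hl, h8, h16, h32, h64, show ¬ value_bits + 1 ≤ 8 by omega]
          · have hl : Nat.log2 value_bits.toNat = 6 := pv_log2_between 6 _ (by omega) (by omega)
            simp [leoLoopA, hl, h8, h16, h32, h64, hpre, show ¬ value_bits + 1 ≤ 8 by omega]
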